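-- pv_equiv track=rewrite | github.com/NordeaOSS/esp.bitbucket | plugins/module_utils/bitbucket.py | listify_comma_sep_strings_in_list
-- ===== SOURCE A (Python) =====
-- def listify_comma_sep_strings_in_list(some_list):
--     """
--     method to accept a list of strings as the parameter, find any strings
--     in that list that are comma separated, remove them from the list and add
--     their comma separated elements to the original list
--     """
--     new_list = []
--     remove_from_original_list = []
--     for element in some_list:
--         if ',' in element:
--             remove_from_original_list.append(element)
--             new_list.extend([e.strip() for e in element.split(',')])
--
--     for element in remove_from_original_list:
--         some_list.remove(element)
--
--     some_list.extend(new_list)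
--
--     if some_list == [""]:
--         return []
--
--     return some_list
-- ===== SOURCE B (Python) =====
-- def listify_comma_sep_strings_in_list(some_list):
--     kept = [e for e in some_list if ',' not in e]
--     split_out = [p.strip() for e in some_list if ',' in e for p in e.split(',')]
--     result = kept + split_out
--     return [] if result == [""] else result
-- ===== Notes on version B (the rewrite author's own statement) =====
-- stated objective: alternative
-- what changed: Replaces A's collect-then-remove scheme (building a removal list and mutating the input with list.remove) with two comprehensions that keep non-comma elements in order and append the stripped split pieces, without mutating the input.
import Mathlib
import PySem

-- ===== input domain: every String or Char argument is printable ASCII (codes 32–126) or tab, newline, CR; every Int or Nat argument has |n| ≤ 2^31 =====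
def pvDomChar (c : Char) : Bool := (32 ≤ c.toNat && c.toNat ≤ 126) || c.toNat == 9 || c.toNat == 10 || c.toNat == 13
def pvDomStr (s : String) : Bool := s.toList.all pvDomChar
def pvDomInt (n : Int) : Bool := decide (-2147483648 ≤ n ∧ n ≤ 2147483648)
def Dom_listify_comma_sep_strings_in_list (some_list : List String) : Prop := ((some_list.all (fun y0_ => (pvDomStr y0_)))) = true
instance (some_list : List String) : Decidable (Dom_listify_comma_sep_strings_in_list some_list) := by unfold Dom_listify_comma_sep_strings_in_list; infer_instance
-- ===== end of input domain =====

-- B computes the result with two comprehensions (kept elements, then split pieces) instead of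
-- A's collect-then-remove scheme; equivalence is about the RETURN value only: Python A mutates
-- its argument in place (list.remove/extend), B does not.


-- ===== PORT A =====
-- some_list.remove(element); the ValueError branch (none) is unreachable here, since every
-- removed element was collected from the list itself.
def pvRemoveA (xs : List String) (v : String) : List String :=
  (PySem.List.remove? xs v).getD xs

def listify_comma_sep_strings_in_list (some_list : List String) : List String :=
  -- element.split(',') : sep "," is nonempty, so split? is always some (getD [] unreachable)
  -- first loop: acc.1 = remove_from_original_list, acc.2 = new_list
  let p := some_list.foldl (fun (acc : List String × List String) element =>
      if PySem.Str.isIn "," element then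
        (acc.1 ++ [element], acc.2 ++ ((PySem.Str.split? element ",").getD []).map PySem.Str.strip)
      else acc) ([], [])
  -- second loop: some_list.remove(element) for each collected element
  let l1 := p.1.foldl (fun l e => pvRemoveA l e) some_list
  let l2 := l1 ++ p.2
  if l2 = [""] then [] else l2

-- ===== PORT B =====
def listify_comma_sep_strings_in_list_alt (some_list : List String) : List String :=
  let kept := some_list.filter (fun e => !(PySem.Str.isIn "," e))
  let split_out := (some_list.filter (fun e => PySem.Str.isIn "," e)).flatMap
      (fun e => ((PySem.Str.split? e ",").getD []).map PySem.Str.strip)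
  let result := kept ++ split_out
  if result = [""] then [] else result

-- ===== PRECONDITION & SPEC =====
def Spec_listify_comma_sep_strings_in_list (some_list : List String) (out : List String) : Prop := out = listify_comma_sep_strings_in_list_alt some_list
instance (some_list : List String) (out : List String) : Decidable (Spec_listify_comma_sep_strings_in_list some_list out) := by unfold Spec_listify_comma_sep_strings_in_list; infer_instance

-- ===== CLAIM (what is proved, stated in full; the proofs are below) =====
def Claim_equal_listify_comma_sep_strings_in_list : Prop := ∀ (some_list : List String), Dom_listify_comma_sep_strings_in_list some_list → Spec_listify_comma_sep_strings_in_list some_list (listify_comma_sep_strings_in_list some_list)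

-- ===== LEMMAS AND PROOFS =====

-- A's first loop collects exactly the comma elements and their stripped split pieces.
theorem pvFoldPair (g : String → List String) (p : String → Bool) :
    ∀ (xs a1 a2 : List String),
      xs.foldl (fun (acc : List String × List String) element =>
        if p element then (acc.1 ++ [element], acc.2 ++ g element) else acc) (a1, a2)
      = (a1 ++ xs.filter p, a2 ++ (xs.filter p).flatMap g) := by
  intro xs
  induction xs with
  | nil => simp
  | cons x t ih =>
    intro a1 a2
    by_cases h : p x = true <;> simp [List.foldl_cons, h, ih]

theorem pvRemoveA_cons_of_ne (a : String) (t : List String) (v : String) (h : a ≠ v) :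
    pvRemoveA (a :: t) v = a :: pvRemoveA t v := by
  unfold pvRemoveA
  rw [PySem.List.remove?_cons_of_ne t h]
  cases PySem.List.remove? t v <;> simp

theorem pvFoldRemove_cons (a : String) :
    ∀ (l t : List String), (∀ b ∈ l, b ≠ a) →
      l.foldl (fun l e => pvRemoveA l e) (a :: t) = a :: l.foldl (fun l e => pvRemoveA l e) t := by
  intro l
  induction l with
  | nil => intro t _; rfl
  | cons b l ih =>
    intro t h
    have hb : a ≠ b := fun e => h b (by simp) e.symm
    simp only [List.foldl_cons, pvRemoveA_cons_of_ne a t b hb]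
    exact ih _ (fun x hx => h x (by simp [hx]))

-- Removing, in order, every comma element of xs from xs leaves exactly the non-comma elements.
theorem pvFoldRemove_filter (p : String → Bool) :
    ∀ (xs : List String),
      (xs.filter p).foldl (fun l e => pvRemoveA l e) xs = xs.filter (fun e => !(p e)) := by
  intro xs
  induction xs with
  | nil => rfl
  | cons a t ih =>
    by_cases h : p a = true
    · rw [List.filter_cons_of_pos h, List.foldl_cons]
      have : pvRemoveA (a :: t) a = t := by
        unfold pvRemoveA; rw [PySem.List.remove?_cons_self a t]; rfl
      rw [this, ih]
      simp [List.filter_cons, h]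
    · have hf : (a :: t).filter p = t.filter p := by simp [List.filter_cons, h]
      rw [hf, pvFoldRemove_cons a _ t ?_, ih]
      · simp [List.filter_cons, h]
      · intro b hb heq
        have := List.of_mem_filter hb
        rw [heq] at this
        simp [this] at h

-- ===== VERDICT (by name: the statement is the Claim_ definition above) =====
theorem listify_comma_sep_strings_in_list_spec : Claim_equal_listify_comma_sep_strings_in_list := by
  intro some_list _
  unfold Spec_listify_comma_sep_strings_in_list
  unfold listify_comma_sep_strings_in_list listify_comma_sep_strings_in_list_alt
  rw [pvFoldPair (fun e => ((PySem.Str.split? e ",").getD []).map PySem.Str.strip)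
      (fun e => PySem.Str.isIn "," e) some_list [] []]
  simp only [List.nil_append]
  rw [pvFoldRemove_filter (fun e => PySem.Str.isIn "," e) some_list]
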